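-- pv_equiv track=rewrite | github.com/Usefullatwork/Cot-ExplorerV2 | src/analysis/scoring.py | _check_session_alignment
-- ===== SOURCE A (Python) =====
-- _SESSION_WINDOWS: dict[str, list[tuple[int, int]]] = {
--     "A": [(7, 11), (13, 17)],   # Forex: London 07-11, NY overlap 13-17
--     "B": [(7, 17)],             # Commodities: London + NY
--     "C": [(14, 21)],            # Indices: NY session
-- }
--
-- def _check_session_alignment(instrument_class: str, current_hour_cet: int) -> bool:
--     """True if current CET hour is within the optimal session for this class.
--
--     Unknown instrument class defaults to True (no penalty).
--     """
--     windows = _SESSION_WINDOWS.get(instrument_class.upper())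
--     if windows is None:
--         return True
--     for start, end in windows:
--         if start > end:
--             # Wraps midnight (e.g. 23→7)
--             if current_hour_cet >= start or current_hour_cet <= end:
--                 return True
--         else:
--             if start <= current_hour_cet <= end:
--                 return True
--     return False
-- ===== SOURCE B (Python) =====
-- _SESSION_WINDOWS: dict[str, list[tuple[int, int]]] = {
--     "A": [(7, 11), (13, 17)],
--     "B": [(7, 17)],
--     "C": [(14, 21)],
-- }
--
-- # Precomputed table: instrument class -> frozenset of in-session hours.
-- _SESSION_HOURS: dict[str, frozenset[int]] = {
--     cls: frozenset(h for start, end in windows for h in range(start, end + 1))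
--     for cls, windows in _SESSION_WINDOWS.items()
-- }
--
-- def _check_session_alignment(instrument_class: str, current_hour_cet: int) -> bool:
--     hours = _SESSION_HOURS.get(instrument_class.upper())
--     if hours is None:
--         return True
--     return current_hour_cet in hours
-- ===== Notes on version B (the rewrite author's own statement) =====
-- stated objective: simpler
-- what changed: Replaces the per-call scan over (start,end) windows with per-window range/wrap branching by a module-level precomputed hour-set table, so the call body is a single lookup plus one membership test.
import Mathlib
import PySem

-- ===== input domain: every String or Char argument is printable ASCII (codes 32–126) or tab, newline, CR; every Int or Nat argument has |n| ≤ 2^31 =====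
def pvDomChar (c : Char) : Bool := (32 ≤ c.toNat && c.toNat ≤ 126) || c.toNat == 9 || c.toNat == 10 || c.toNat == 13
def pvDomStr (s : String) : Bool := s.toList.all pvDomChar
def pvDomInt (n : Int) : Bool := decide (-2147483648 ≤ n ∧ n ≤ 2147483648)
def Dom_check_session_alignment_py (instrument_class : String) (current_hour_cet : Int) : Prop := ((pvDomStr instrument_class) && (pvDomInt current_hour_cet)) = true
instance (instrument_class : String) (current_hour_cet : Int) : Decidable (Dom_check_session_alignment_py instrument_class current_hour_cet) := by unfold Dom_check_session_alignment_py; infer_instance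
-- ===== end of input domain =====

-- B replaces the per-call scan over (start,end) windows by a precomputed
-- class -> in-session-hours table and one membership test (simpler call body).
-- ===== PORT A =====
def pvSessionWindows : PySem.Dict String (List (Int × Int)) :=
  PySem.Dict.ofList [("A", [(7, 11), (13, 17)]), ("B", [(7, 17)]), ("C", [(14, 21)])]

-- the for-loop over windows with early return
def pvWindowLoop (h : Int) : List (Int × Int) → Bool
  | [] => false
  | (s, e) :: rest =>
    if s > e then
      if h ≥ s ∨ h ≤ e then true else pvWindowLoop h rest
    else
      if s ≤ h ∧ h ≤ e then true else pvWindowLoop h rest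

def check_session_alignment_py (instrument_class : String) (current_hour_cet : Int) : Bool :=
  match PySem.Dict.get? pvSessionWindows (PySem.Str.upper instrument_class) with
  | none => true
  | some windows => pvWindowLoop current_hour_cet windows

-- ===== PORT B =====
-- precomputed table built from the same windows (Source B's dict comprehension)
def pvSessionHours : PySem.Dict String (List Int) :=
  PySem.Dict.ofList (pvSessionWindows.items.map (fun cw =>
    (cw.1, cw.2.flatMap (fun se => PySem.List.pyRange se.1 (se.2 + 1) 1))))

def check_session_alignment_py_alt (instrument_class : String) (current_hour_cet : Int) : Bool :=
  match PySem.Dict.get? pvSessionHours (PySem.Str.upper instrument_class) with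
  | none => true
  | some hours => hours.contains current_hour_cet

-- ===== PRECONDITION & SPEC =====
def Spec_check_session_alignment_py (instrument_class : String) (current_hour_cet : Int) (out : Bool) : Prop := out = check_session_alignment_py_alt instrument_class current_hour_cet
instance (instrument_class : String) (current_hour_cet : Int) (out : Bool) : Decidable (Spec_check_session_alignment_py instrument_class current_hour_cet out) := by unfold Spec_check_session_alignment_py; infer_instance

-- ===== CLAIM (what is proved, stated in full; the proofs are below) =====
def Claim_equal_check_session_alignment_py : Prop := ∀ (instrument_class : String) (current_hour_cet : Int), Dom_check_session_alignment_py instrument_class current_hour_cet → Spec_check_session_alignment_py instrument_class current_hour_cet (check_session_alignment_py instrument_class current_hour_cet)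

-- ===== LEMMAS AND PROOFS =====

-- ===== VERDICT (by name: the statement is the Claim_ definition above) =====
-- the literal contents of the two dicts, as plain Dict.mk literals
theorem pvWindows_mk : pvSessionWindows =
    PySem.Dict.mk [("A", [(7, 11), (13, 17)]), ("B", [(7, 17)]), ("C", [(14, 21)])] := by decide

theorem pvHours_mk : pvSessionHours =
    PySem.Dict.mk [("A", [7, 8, 9, 10, 11, 13, 14, 15, 16, 17]),
      ("B", [7, 8, 9, 10, 11, 12, 13, 14, 15, 16, 17]),
      ("C", [14, 15, 16, 17, 18, 19, 20, 21])] := by decide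

-- ===== VERDICT (by name: the statement is the Claim_ definition above) =====
theorem check_session_alignment_py_spec : Claim_equal_check_session_alignment_py := by
  intro ic h _
  unfold Spec_check_session_alignment_py
  unfold check_session_alignment_py check_session_alignment_py_alt
  rw [pvWindows_mk, pvHours_mk]
  by_cases hA : PySem.Str.upper ic = "A" <;>
    by_cases hB : PySem.Str.upper ic = "B" <;>
      by_cases hC : PySem.Str.upper ic = "C" <;>
        simp [PySem.Dict.get?_mk_cons, hA, hB, hC, Ne.symm, pvWindowLoop] <;> (try simp [PySem.Dict.get?]) <;>
          (try (rw [Bool.eq_iff_iff]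
                simp only [Bool.or_eq_true, Bool.and_eq_true, decide_eq_true_eq]
                omega))
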